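-- pv_equiv track=rewrite | github.com/sorites1/GHOSTBURN | 0_2_build_gear_index.py | escape_pipes_in_brackets
-- ===== SOURCE A (Python) =====
-- def escape_pipes_in_brackets(text):
--     """
--     Escape all pipes that appear inside [ ] brackets, but only if not already escaped.
--     E.g., [Link|Text] becomes [Link\|Text]
--     But [Link\|Text] stays as [Link\|Text]
--     """
--     result = []
--     in_brackets = False
--     i = 0
--
--     while i < len(text):
--         char = text[i]
--
--         if char == '[':
--             in_brackets = True
--             result.append(char)
--             i += 1
--         elif char == ']':
--             in_brackets = False
--             result.append(char)
--             i += 1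
--         elif char == '|' and in_brackets:
--             # Check if it's already escaped (preceded by \)
--             if i > 0 and text[i-1] == '\\':
--                 # Already escaped, just add the pipe
--                 result.append(char)
--             else:
--                 # Not escaped, add escape
--                 result.append('\\|')
--             i += 1
--         else:
--             result.append(char)
--             i += 1
--
--     return ''.join(result)
-- ===== SOURCE B (Python) =====
-- def _escape_region(region, prev):
--     # escape pipes in region not preceded (in the original text) by a backslash;
--     # prev is the character just before region in the original text
--     out = []
--     for ch in region:
--         if ch == '|' and prev != '\\':
--             out.append('\\|')
--         else:
--             out.append(ch)
--         prev = ch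
--     return ''.join(out)
--
-- def escape_pipes_in_brackets(text):
--     before, br, after = text.partition('[')
--     if not br:
--         return before
--     region, close, rest = after.partition(']')
--     return before + '[' + _escape_region(region, '[') + close + escape_pipes_in_brackets(rest)
-- ===== Notes on version B (the rewrite author's own statement) =====
-- stated objective: faster
-- what changed: Replaces the per-character index walk with an in_brackets flag by recursive region splitting: str.partition finds each bracket region in C-speed bulk scans and pipes are escaped only inside the region.
import Mathlib
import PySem

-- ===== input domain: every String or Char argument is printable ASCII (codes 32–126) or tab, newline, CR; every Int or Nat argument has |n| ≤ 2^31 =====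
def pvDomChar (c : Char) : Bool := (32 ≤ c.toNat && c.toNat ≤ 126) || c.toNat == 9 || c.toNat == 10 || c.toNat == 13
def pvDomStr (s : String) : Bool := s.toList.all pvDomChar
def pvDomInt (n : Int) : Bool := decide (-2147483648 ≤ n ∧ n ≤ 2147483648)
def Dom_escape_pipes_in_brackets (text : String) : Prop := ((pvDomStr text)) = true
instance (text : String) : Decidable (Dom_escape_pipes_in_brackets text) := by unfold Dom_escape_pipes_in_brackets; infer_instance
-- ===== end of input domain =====

-- B replaces A's per-character index walk with an in_brackets flag by recursive
-- region splitting (partition on '[' / ']' and escape pipes only inside each region).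

-- ===== PORT A =====
-- A's while loop over index i; the index is used only for text[i] (current char)
-- and text[i-1] (previous char), so the loop is transcribed as a recursion carrying
-- the previous character ('i > 0 and text[i-1] == \\' ↔ prev = some '\\').
def aLoop : List Char → Bool → Option Char → List Char
  | [], _, _ => []
  | c :: rest, inB, prev =>
    if c = '[' then c :: aLoop rest true (some c)
    else if c = ']' then c :: aLoop rest false (some c)
    else if c = '|' ∧ inB then
      (if prev = some '\\' then [c] else ['\\', '|']) ++ aLoop rest inB (some c)
    else c :: aLoop rest inB (some c)

def escape_pipes_in_brackets (text : String) : String :=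
  String.ofList (aLoop text.toList false none)

-- ===== PORT B =====
-- str.partition(sep) for a one-character sep, over List Char:
-- returns (head, sep-found?, tail).
def bPartition (sep : Char) (cs : List Char) : List Char × Bool × List Char :=
  match cs.span (fun c => c ≠ sep) with
  | (pre, post) =>
    match post with
    | [] => (pre, false, [])
    | _ :: t => (pre, true, t)

-- _escape_region: fold over the region carrying the previous original character.
def escRegion : List Char → Char → List Char
  | [], _ => []
  | c :: cs, prev =>
    (if c = '|' ∧ prev ≠ '\\' then ['\\', '|'] else [c]) ++ escRegion cs c

-- the recursion of Source B, with a fuel counter as the (always sufficient)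
-- totality guard: every step consumes at least one character.
def bRecF : Nat → List Char → List Char
  | 0, _ => []
  | n + 1, cs =>
    match bPartition '[' cs with
    | (before, false, _) => before
    | (before, true, after) =>
      match bPartition ']' after with
      | (region, foundC, rest) =>
        before ++ '[' :: escRegion region '[' ++
          (if foundC then [']'] else []) ++ bRecF n rest

def escape_pipes_in_brackets_alt (text : String) : String :=
  String.ofList (bRecF (text.toList.length + 1) text.toList)

-- ===== PRECONDITION & SPEC =====
def Spec_escape_pipes_in_brackets (text : String) (out : String) : Prop := out = escape_pipes_in_brackets_alt text
instance (text : String) (out : String) : Decidable (Spec_escape_pipes_in_brackets text out) := by unfold Spec_escape_pipes_in_brackets; infer_instance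

-- ===== CLAIM (what is proved, stated in full; the proofs are below) =====
def Claim_equal_escape_pipes_in_brackets : Prop := ∀ (text : String), Dom_escape_pipes_in_brackets text → Spec_escape_pipes_in_brackets text (escape_pipes_in_brackets text)

-- ===== LEMMAS AND PROOFS =====

-- With in_brackets = false the previous character is never consulted.
theorem aLoop_false_prev (cs : List Char) (p q : Option Char) :
    aLoop cs false p = aLoop cs false q := by
  cases cs with
  | nil => rfl
  | cons c rest => simp [aLoop]

-- Outside brackets everything before the first '[' is copied verbatim.
theorem aLoop_false_prefix (pre : List Char) (rest : List Char) (p : Option Char)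
    (h : '[' ∉ pre) :
    aLoop (pre ++ rest) false p = pre ++ aLoop rest false none := by
  induction pre generalizing p with
  | nil => simpa using aLoop_false_prev rest p none
  | cons c t ih =>
    have hc : c ≠ '[' := by intro e; exact h (e ▸ List.mem_cons_self ..)
    have ht : '[' ∉ t := fun m => h (List.mem_cons_of_mem _ m)
    by_cases hcb : c = ']'
    · simp [aLoop, hc, hcb, ih _ ht]
    · simp [aLoop, hc, hcb, ih _ ht]

-- Inside brackets and before the closing ']' A escapes exactly like escRegion.
theorem aLoop_true_region (mid : List Char) (tail : List Char) (prev : Char)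
    (h : ']' ∉ mid) :
    aLoop (mid ++ tail) true (some prev) =
      escRegion mid prev ++ aLoop tail true (some (mid.getLastD prev)) := by
  induction mid generalizing prev with
  | nil => simp [escRegion]
  | cons c t ih =>
    have hc : c ≠ ']' := by intro e; exact h (e ▸ List.mem_cons_self ..)
    have ht : ']' ∉ t := fun m => h (List.mem_cons_of_mem _ m)
    have hlast : (c :: t).getLastD prev = t.getLastD c := by
      cases t <;> simp [List.getLastD]
    rw [hlast]
    by_cases hcl : c = '['
    · simp [aLoop, hc, hcl, escRegion, ih _ ht]
    · by_cases hcp : c = '|'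
      · by_cases hbs : prev = '\\'
        · simp [aLoop, hc, hcl, hcp, hbs, escRegion, ih _ ht]
        · have hns : ¬ (some prev = some '\\') := by simpa using hbs
          simp [aLoop, hc, hcl, hcp, hbs, escRegion, hns, ih _ ht]
      · simp [aLoop, hc, hcl, hcp, escRegion, ih _ ht]

-- What a span result tells us about the input.
theorem span_split (sep : Char) (cs pre post : List Char)
    (h : cs.span (fun c => c ≠ sep) = (pre, post)) :
    cs = pre ++ post ∧ sep ∉ pre ∧ (∀ x t, post = x :: t → x = sep) := by
  have hs := (List.span_eq_takeWhile_dropWhile (p := fun c => c ≠ sep) (l := cs))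
  rw [h] at hs
  obtain ⟨h1, h2⟩ := Prod.mk.injEq .. ▸ hs
  refine ⟨?_, ?_, ?_⟩
  · rw [h1, h2]
    simpa using (List.takeWhile_append_dropWhile (p := fun c => c ≠ sep) (l := cs)).symm
  · intro m
    have := List.mem_takeWhile_imp (h1 ▸ m)
    simp at this
  · intro x t he
    have hx : ¬ (fun c => decide (c ≠ sep)) x = true := by
      have hd := List.head?_dropWhile_not (p := fun c => decide (c ≠ sep)) (l := cs)
      rw [← h2, he] at hd
      simp at hd
      simpa using hd
    simpa using hx

theorem bRecF_nil (n : Nat) : bRecF n [] = [] := by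
  cases n with
  | zero => rfl
  | succ n => simp [bRecF, bPartition]

theorem bRecF_no_bracket (n : Nat) (cs pre : List Char)
    (hs : cs.span (fun c => c ≠ '[') = (pre, [])) :
    bRecF (n + 1) cs = pre := by
  simp only [bRecF, bPartition]
  rw [hs]

theorem bRecF_unclosed (n : Nat) (cs pre t region : List Char)
    (hs : cs.span (fun c => c ≠ '[') = (pre, '[' :: t))
    (hs2 : t.span (fun c => c ≠ ']') = (region, [])) :
    bRecF (n + 1) cs = pre ++ '[' :: escRegion region '[' := by
  simp only [bRecF, bPartition]
  rw [hs]
  dsimp only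
  simp only [hs2]
  simp [bRecF_nil]

theorem bRecF_closed (n : Nat) (cs pre t region t2 : List Char)
    (hs : cs.span (fun c => c ≠ '[') = (pre, '[' :: t))
    (hs2 : t.span (fun c => c ≠ ']') = (region, ']' :: t2)) :
    bRecF (n + 1) cs = pre ++ '[' :: (escRegion region '[' ++ ']' :: bRecF n t2) := by
  simp only [bRecF, bPartition]
  rw [hs]
  dsimp only
  simp only [hs2]
  simp

-- Main equivalence, by induction on the fuel.
theorem aLoop_eq_bRecF (n : Nat) (cs : List Char) (hn : cs.length < n) :
    aLoop cs false none = bRecF n cs := by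
  induction n generalizing cs with
  | zero => omega
  | succ n ih =>
    rcases hs : cs.span (fun c => c ≠ '[') with ⟨pre, post⟩
    obtain ⟨hcs, hpre, hhead⟩ := span_split '[' cs pre post hs
    cases post with
    | nil =>
      rw [bRecF_no_bracket n cs pre hs, hcs]
      simpa [aLoop] using aLoop_false_prefix pre [] none hpre
    | cons x t =>
      have hx : x = '[' := hhead x t rfl
      subst hx
      rcases hs2 : t.span (fun c => c ≠ ']') with ⟨region, post2⟩
      obtain ⟨ht, hreg, hhead2⟩ := span_split ']' t region post2 hs2
      cases post2 with
      | nil =>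
        have hteq : t = region := by simpa using ht
        subst hteq
        rw [bRecF_unclosed n cs pre t t hs hs2]
        rw [hcs, aLoop_false_prefix pre _ none hpre]
        have step : aLoop ('[' :: t) false none = '[' :: aLoop t true (some '[') := by
          simp [aLoop]
        rw [step]
        have hr := aLoop_true_region t [] '[' hreg
        simp [aLoop] at hr
        rw [hr]
      | cons y t2 =>
        have hy : y = ']' := hhead2 y t2 rfl
        subst hy
        have hlen : t2.length < n := by
          rw [hcs, ht] at hn
          simp at hn
          omega
        rw [bRecF_closed n cs pre t region t2 hs hs2]
        rw [hcs, aLoop_false_prefix pre _ none hpre]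
        have step : aLoop ('[' :: t) false none = '[' :: aLoop t true (some '[') := by
          simp [aLoop]
        rw [step, ht, aLoop_true_region region (']' :: t2) '[' hreg]
        have step2 : aLoop (']' :: t2) true (some (region.getLastD '[')) =
            ']' :: aLoop t2 false none := by
          simp [aLoop]
          exact aLoop_false_prev t2 _ none
        rw [step2, ih t2 hlen]

-- ===== VERDICT (by name: the statement is the Claim_ definition above) =====
theorem escape_pipes_in_brackets_spec : Claim_equal_escape_pipes_in_brackets := by
  intro text _
  unfold Spec_escape_pipes_in_brackets escape_pipes_in_brackets escape_pipes_in_brackets_alt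
  rw [aLoop_eq_bRecF (text.toList.length + 1) text.toList (by omega)]
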